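-- pv_equiv track=rewrite | github.com/mchenetz/sparkd | sparkd/services/launch.py | _extract_reason
-- ===== SOURCE A (Python) =====
-- def _extract_reason(tail: list[str]) -> str:
--     """Best-effort one-liner explanation pulled from a launch log tail.
--
--     Looks (in priority order) for: an OSError/RuntimeError/ValueError
--     style line, a 'Tensor parallel' / 'CUDA out of memory' line, or any
--     line starting with 'Error:'/'ERROR:'. Falls back to the last
--     non-empty line. Truncated to 200 chars so the UI can render inline.
--     """
--     if not tail:
--         return ""
--     # Priority 1: explicit Python exception lines (last one wins — usually
--     # the actual cause vs intermediate stack frames).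
--     exc_pattern = (
--         "Error:", "Exception:", "OSError:", "RuntimeError:",
--         "ValueError:", "KeyError:", "TypeError:", "ImportError:",
--         "AssertionError:", "MemoryError:",
--     )
--     for line in reversed(tail):
--         for marker in exc_pattern:
--             if marker in line:
--                 return _truncate(line.strip())
--     # Priority 2: vLLM's known fatal warnings.
--     for line in reversed(tail):
--         for marker in ("CUDA out of memory", "Tensor parallel", "FATAL"):
--             if marker in line:
--                 return _truncate(line.strip())
--     # Fallback: last non-empty line.
--     return _truncate(tail[-1].strip())
--
-- def _truncate(s: str, n: int = 200) -> str:
--     s = s.strip()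
--     return s if len(s) <= n else s[: n - 1] + "…"
-- ===== SOURCE B (Python) =====
-- _EXC = ("Error:", "Exception:", "OSError:", "RuntimeError:",
--         "ValueError:", "KeyError:", "TypeError:", "ImportError:",
--         "AssertionError:", "MemoryError:")
-- _FATAL = ("CUDA out of memory", "Tensor parallel", "FATAL")
--
--
-- def _truncate(s: str, n: int = 200) -> str:
--     s = s.strip()
--     return s if len(s) <= n else s[: n - 1] + "…"
--
--
-- def _priority(line: str) -> int:
--     """1 = exception line, 2 = known fatal warning, 3 = anything else."""
--     if any(m in line for m in _EXC):
--         return 1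
--     if any(m in line for m in _FATAL):
--         return 2
--     return 3
--
--
-- def _extract_reason(tail: list[str]) -> str:
--     """Single classify-and-select pass: pick the line with the best
--     (lowest) priority, last occurrence winning within a priority; with
--     no marker anywhere every line has priority 3 and the last line wins."""
--     if not tail:
--         return ""
--     best = max(range(len(tail)), key=lambda i: (-_priority(tail[i]), i))
--     return _truncate(tail[best].strip())
-- ===== Notes on version B (the rewrite author's own statement) =====
-- stated objective: alternative
-- what changed: A's three prioritized reversed scans (exception markers, then fatal-warning markers, then tail[-1] fallback) are replaced by one classify-and-select pass: each line is mapped to a priority and the single best line is chosen as max over indices of the key (-priority, index).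
import Mathlib
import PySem

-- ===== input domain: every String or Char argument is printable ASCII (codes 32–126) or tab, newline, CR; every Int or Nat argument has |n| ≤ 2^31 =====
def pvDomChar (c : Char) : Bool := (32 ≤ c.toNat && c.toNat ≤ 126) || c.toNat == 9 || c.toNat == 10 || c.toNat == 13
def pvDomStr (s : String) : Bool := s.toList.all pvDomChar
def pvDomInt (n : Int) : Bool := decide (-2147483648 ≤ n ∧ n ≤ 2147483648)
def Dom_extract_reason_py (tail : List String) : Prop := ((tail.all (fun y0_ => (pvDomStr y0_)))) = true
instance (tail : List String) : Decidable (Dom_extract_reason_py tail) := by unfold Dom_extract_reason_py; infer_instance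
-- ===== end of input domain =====

-- B replaces A's three prioritized reversed scans by a single classify-and-select pass
-- (max over indices of the key (-priority, index)); same cost, different decomposition.


-- module-level constants shared by A and B (the exact marker tuples)
def excMarkers : List String :=
  ["Error:", "Exception:", "OSError:", "RuntimeError:",
   "ValueError:", "KeyError:", "TypeError:", "ImportError:",
   "AssertionError:", "MemoryError:"]

def fatalMarkers : List String := ["CUDA out of memory", "Tensor parallel", "FATAL"]

-- 'any(marker in line for marker in markers)' (the inner 'for marker' loop)
def matches_py (markers : List String) (line : String) : Bool :=
  markers.any (fun m => PySem.Str.isIn m line)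

-- _truncate, a module helper both versions call
def truncate_py (s : String) : String :=
  let s := PySem.Str.strip s
  if PySem.Str.len s ≤ 200 then s else PySem.Str.slice s none (some 199) ++ "…"

-- ===== PORT A =====
-- 'for line in reversed(tail): for marker in markers: if marker in line: return line'
def scanMarkers (markers : List String) : List String → Option String
  | [] => none
  | l :: rest => if matches_py markers l then some l else scanMarkers markers rest

def extract_reason_py (tail : List String) : String :=
  if tail.isEmpty then "" else
  match scanMarkers excMarkers tail.reverse with
  | some line => truncate_py (PySem.Str.strip line)
  | none =>
    match scanMarkers fatalMarkers tail.reverse with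
    | some line => truncate_py (PySem.Str.strip line)
    | none => truncate_py (PySem.Str.strip (PySem.List.pyGetD tail (-1) ""))
      -- tail[-1]: always in range here (tail nonempty)

-- ===== PORT B =====
def prio_py (line : String) : Int :=
  if matches_py excMarkers line then 1
  else if matches_py fatalMarkers line then 2
  else 3

-- the key lambda i: (-_priority(tail[i]), i); tail[i] always in range here
def keyB (tail : List String) (i : Int) : Int × Int :=
  (-(prio_py (PySem.List.pyGetD tail i "")), i)

-- Python tuple '>'
def tupGt (a b : Int × Int) : Bool := a.1 > b.1 || (a.1 == b.1 && a.2 > b.2)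

-- one comparison step of max(…, key=…): keep the current best unless strictly beaten
def stepB (tail : List String) (b j : Int) : Int :=
  if tupGt (keyB tail j) (keyB tail b) then j else b

-- max(range(len(tail)), key=…): first element, then fold keeping the first maximum
def bestIndex (tail : List String) : Int :=
  match PySem.List.pyRange 0 (PySem.List.len tail) 1 with
  | [] => -1  -- unreachable: guarded by the emptiness check below
  | i :: rest => rest.foldl (stepB tail) i

def extract_reason_py_alt (tail : List String) : String :=
  if tail.isEmpty then "" else
  truncate_py (PySem.Str.strip (PySem.List.pyGetD tail (bestIndex tail) ""))

-- ===== PRECONDITION & SPEC =====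
def Spec_extract_reason_py (tail : List String) (out : String) : Prop := out = extract_reason_py_alt tail
instance (tail : List String) (out : String) : Decidable (Spec_extract_reason_py tail out) := by unfold Spec_extract_reason_py; infer_instance

-- ===== CLAIM (what is proved, stated in full; the proofs are below) =====
def Claim_equal_extract_reason_py : Prop := ∀ (tail : List String), Dom_extract_reason_py tail → Spec_extract_reason_py tail (extract_reason_py tail)

-- ===== LEMMAS AND PROOFS =====

-- the line A's scans select (before strip/truncate)
def acore (tail : List String) : String :=
  match scanMarkers excMarkers tail.reverse with
  | some line => line
  | none =>
    match scanMarkers fatalMarkers tail.reverse with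
    | some line => line
    | none => PySem.List.pyGetD tail (-1) ""

-- the minimal priority occurring in tail (3 if no marker occurs)
def mprio (tail : List String) : Int :=
  match scanMarkers excMarkers tail.reverse with
  | some _ => 1
  | none =>
    match scanMarkers fatalMarkers tail.reverse with
    | some _ => 2
    | none => 3

-- scanMarkers returns a matching element of the list …
theorem scan_eq_some {markers : List String} : ∀ {l : List String} {x : String},
    scanMarkers markers l = some x → matches_py markers x = true ∧ x ∈ l := by
  intro l
  induction l with
  | nil => intro x h; simp [scanMarkers] at h
  | cons a rest ih =>
    intro x h
    by_cases ha : matches_py markers a = true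
    · rw [scanMarkers, if_pos ha] at h
      cases h; exact ⟨ha, List.mem_cons_self⟩
    · rw [scanMarkers, if_neg ha] at h
      rcases ih h with ⟨h1, h2⟩
      exact ⟨h1, List.mem_cons_of_mem _ h2⟩

-- … and none means no element matches
theorem scan_eq_none {markers : List String} : ∀ {l : List String},
    scanMarkers markers l = none → ∀ x ∈ l, matches_py markers x = false := by
  intro l
  induction l with
  | nil => intro _ x hx; simp at hx
  | cons a rest ih =>
    intro h x hx
    by_cases ha : matches_py markers a = true
    · rw [scanMarkers, if_pos ha] at h; cases h
    · rw [scanMarkers, if_neg ha] at h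
      rcases List.mem_cons.mp hx with rfl | hx'
      · simpa using ha
      · exact ih h x hx'

theorem last_mem {tail : List String} (h : tail ≠ []) :
    PySem.List.pyGetD tail (-1) "" ∈ tail := by
  rcases List.eq_nil_or_concat tail with rfl | ⟨ys, x, rfl⟩
  · exact absurd rfl h
  · simp only [List.concat_eq_append, PySem.List.pyGetD_neg_one_append_singleton]
    exact List.mem_append_right _ List.mem_cons_self

theorem prio_of_acore {tail : List String} (h : tail ≠ []) :
    prio_py (acore tail) = mprio tail := by
  unfold acore mprio
  cases h1 : scanMarkers excMarkers tail.reverse with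
  | some l =>
    rcases scan_eq_some h1 with ⟨hm, _⟩
    simp [prio_py, hm]
  | none =>
    cases h2 : scanMarkers fatalMarkers tail.reverse with
    | some l =>
      rcases scan_eq_some h2 with ⟨hm, hmem⟩
      have hno := scan_eq_none h1 l hmem
      simp [prio_py, hm, hno]
    | none =>
      have hno1 := scan_eq_none h1 _ (List.mem_reverse.mpr (last_mem h))
      have hno2 := scan_eq_none h2 _ (List.mem_reverse.mpr (last_mem h))
      simp [prio_py, hno1, hno2]

theorem acore_singleton (x : String) : acore [x] = x := by
  unfold acore
  simp only [List.reverse_singleton, scanMarkers]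
  by_cases he : matches_py excMarkers x = true
  · rw [if_pos he]
  · rw [if_neg he]
    by_cases hf : matches_py fatalMarkers x = true
    · rw [if_pos hf]
    · rw [if_neg hf]
      exact PySem.List.pyGetD_neg_one_append_singleton [] x ""

theorem acore_append {ys : List String} (x : String) (h : ys ≠ []) :
    acore (ys ++ [x]) = (if prio_py x ≤ mprio ys then x else acore ys) ∧
    mprio (ys ++ [x]) = min (mprio ys) (prio_py x) := by
  unfold acore mprio prio_py
  rw [List.reverse_append]
  simp only [List.reverse_singleton, List.singleton_append, scanMarkers]
  by_cases he : matches_py excMarkers x = true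
  · rw [if_pos he, if_pos he]
    cases h1 : scanMarkers excMarkers ys.reverse with
    | some l => exact ⟨by norm_num, by norm_num⟩
    | none =>
      cases h2 : scanMarkers fatalMarkers ys.reverse with
      | some l => exact ⟨by norm_num, by norm_num⟩
      | none => exact ⟨by norm_num, by norm_num⟩
  · rw [if_neg he, if_neg he]
    by_cases hf : matches_py fatalMarkers x = true
    · rw [if_pos hf, if_pos hf]
      cases h1 : scanMarkers excMarkers ys.reverse with
      | some l => exact ⟨by norm_num, by norm_num⟩
      | none =>
        cases h2 : scanMarkers fatalMarkers ys.reverse with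
        | some l => exact ⟨by norm_num, by norm_num⟩
        | none => exact ⟨by norm_num, by norm_num⟩
    · rw [if_neg hf, if_neg hf]
      cases h1 : scanMarkers excMarkers ys.reverse with
      | some l => exact ⟨by norm_num, by norm_num⟩
      | none =>
        cases h2 : scanMarkers fatalMarkers ys.reverse with
        | some l => exact ⟨by norm_num, by norm_num⟩
        | none =>
          constructor
          · rw [if_pos (by norm_num)]
            rcases List.eq_nil_or_concat ys with rfl | ⟨zs, z, rfl⟩
            · exact absurd rfl h
            · simp only [List.concat_eq_append, List.append_assoc, List.singleton_append]
              rw [show zs ++ [z, x] = (zs ++ [z]) ++ [x] by simp,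
                PySem.List.pyGetD_neg_one_append_singleton]
          · norm_num

-- the fold only reads indices below n, so appending an element does not change it
theorem foldl_stepB_congr {t1 t2 : List String} {n : Int}
    (hget : ∀ j : Int, 0 ≤ j → j < n → PySem.List.pyGetD t1 j "" = PySem.List.pyGetD t2 j "") :
    ∀ (is : List Int), (∀ j ∈ is, 0 ≤ j ∧ j < n) → ∀ (b : Int), 0 ≤ b → b < n →
    is.foldl (stepB t1) b = is.foldl (stepB t2) b := by
  intro is
  induction is with
  | nil => intro _ b _ _; simp
  | cons i rest ih =>
    intro hall b hb0 hbn
    have hi := hall i List.mem_cons_self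
    have hstep : stepB t1 b i = stepB t2 b i := by
      unfold stepB keyB
      rw [hget i hi.1 hi.2, hget b hb0 hbn]
    have hbi : 0 ≤ stepB t2 b i ∧ stepB t2 b i < n := by
      unfold stepB; split_ifs
      · exact hi
      · exact ⟨hb0, hbn⟩
    simp only [List.foldl_cons, hstep]
    exact ih (fun j hj => hall j (List.mem_cons_of_mem _ hj)) (stepB t2 b i) hbi.1 hbi.2

theorem pyGetD_append_lt {ys : List String} {x : String} {j : Int}
    (h0 : 0 ≤ j) (h1 : j < (ys.length : Int)) :
    PySem.List.pyGetD (ys ++ [x]) j "" = PySem.List.pyGetD ys j "" := by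
  rw [PySem.List.pyGetD_eq_getElem _ _ h0 (by simp; omega),
      PySem.List.pyGetD_eq_getElem _ _ h0 (by omega)]
  rw [List.getElem_append_left]

theorem bestIndex_eq {t : List String} (h : t ≠ []) :
    bestIndex t = (PySem.List.pyRange 1 (t.length : Int)).foldl (stepB t) 0 := by
  have hpos : (0 : Int) < (t.length : Int) := by
    have := List.length_pos_iff.mpr h; omega
  unfold bestIndex
  rw [PySem.List.len_eq, PySem.List.pyRange_one_cons hpos]
  simp only [zero_add]

theorem bestIndex_main : ∀ (tail : List String), tail ≠ [] →
    0 ≤ bestIndex tail ∧ bestIndex tail < (tail.length : Int) ∧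
    PySem.List.pyGetD tail (bestIndex tail) "" = acore tail := by
  intro tail
  induction tail using List.reverseRecOn with
  | nil => intro h; exact absurd rfl h
  | append_singleton ys x ih =>
    intro _
    by_cases hys : ys = []
    · subst hys
      simp only [List.nil_append]
      have hb : bestIndex [x] = 0 := by
        rw [bestIndex_eq (by simp)]
        norm_num [PySem.List.pyRange]
      rw [hb]
      refine ⟨le_refl 0, by simp, ?_⟩
      rw [acore_singleton, PySem.List.pyGetD_eq_getElem _ _ (le_refl 0) (by simp)]
      simp
    · -- ys ≠ []: one more fold step on top of bestIndex ys
      rcases ih hys with ⟨ihb0, ihbn, ihget⟩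
      have hn1 : 1 ≤ (ys.length : Int) := by
        have := List.length_pos_iff.mpr hys; omega
      have hbstep : bestIndex (ys ++ [x]) = stepB (ys ++ [x]) (bestIndex ys) (ys.length : Int) := by
        rw [bestIndex_eq (by simp)]
        rw [show ((ys ++ [x]).length : Int) = (ys.length : Int) + 1 by simp]
        rw [PySem.List.pyRange_one_succ_right hn1, List.foldl_append]
        simp only [List.foldl_cons, List.foldl_nil]
        rw [foldl_stepB_congr (t2 := ys) (n := (ys.length : Int))
              (fun j hj0 hjn => pyGetD_append_lt hj0 hjn)
              _ (fun j hj => by rw [PySem.List.mem_pyRange_one] at hj; omega)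
              0 (le_refl 0) (by omega)]
        rw [← bestIndex_eq hys]
      have hkeyn : keyB (ys ++ [x]) (ys.length : Int) = (-(prio_py x), (ys.length : Int)) := by
        unfold keyB
        rw [PySem.List.pyGetD_eq_getElem _ _ (by omega) (by simp)]
        rw [List.getElem_concat_length (by simp)]
      have hkeyb : keyB (ys ++ [x]) (bestIndex ys) = (-(mprio ys), bestIndex ys) := by
        unfold keyB
        rw [pyGetD_append_lt ihb0 ihbn, ihget, prio_of_acore hys]
      rcases acore_append x hys with ⟨hac, _⟩
      by_cases hle : prio_py x ≤ mprio ys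
      · have hgt : tupGt (keyB (ys ++ [x]) (ys.length : Int)) (keyB (ys ++ [x]) (bestIndex ys)) = true := by
          rw [hkeyn, hkeyb]
          unfold tupGt
          simp only [decide_eq_true_eq, Bool.or_eq_true, Bool.and_eq_true, beq_iff_eq]
          omega
        rw [hbstep]
        unfold stepB
        rw [hgt, if_pos rfl]
        refine ⟨by omega, by simp, ?_⟩
        rw [PySem.List.pyGetD_eq_getElem _ _ (by omega) (by simp)]
        rw [List.getElem_concat_length (by simp)]
        rw [hac, if_pos hle]
      · have hgt : tupGt (keyB (ys ++ [x]) (ys.length : Int)) (keyB (ys ++ [x]) (bestIndex ys)) = false := by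
          rw [hkeyn, hkeyb]
          unfold tupGt
          simp only [Bool.or_eq_false_iff, Bool.and_eq_false_iff, decide_eq_false_iff_not, beq_eq_false_iff_ne]
          omega
        rw [hbstep]
        unfold stepB
        rw [hgt]
        simp only [Bool.false_eq_true, if_false]
        refine ⟨ihb0, by simp; omega, ?_⟩
        rw [pyGetD_append_lt ihb0 ihbn, ihget, hac, if_neg hle]

theorem portA_eq_acore {tail : List String} (h : tail ≠ []) :
    extract_reason_py tail = truncate_py (PySem.Str.strip (acore tail)) := by
  unfold extract_reason_py acore
  rw [if_neg (by simpa [List.isEmpty_iff] using h)]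
  cases h1 : scanMarkers excMarkers tail.reverse with
  | some l => rfl
  | none =>
    cases h2 : scanMarkers fatalMarkers tail.reverse with
    | some l => rfl
    | none => rfl

-- ===== VERDICT (by name: the statement is the Claim_ definition above) =====
theorem extract_reason_py_spec : Claim_equal_extract_reason_py := by
  intro tail _
  unfold Spec_extract_reason_py extract_reason_py_alt
  by_cases h : tail = []
  · subst h; rfl
  · rw [if_neg (by simpa [List.isEmpty_iff] using h)]
    rw [portA_eq_acore h, (bestIndex_main tail h).2.2]
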